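-- pv_equiv track=rewrite | github.com/PandemiaProject/pandemia | src/pandemia/components/health_model/simple_health_model.py | _determine_age_group
-- ===== SOURCE A (Python) =====
-- def _determine_age_group(age, age_groups):
--     """Determine to which age group the agent belongs"""
--
--     if age >= age_groups[-1]:
--         return age_groups[-1]
--     elif age < age_groups[0]:
--         return age_groups[0]
--     else:
--         i = 0
--         while age < age_groups[i] or age >= age_groups[i+1]:
--             i = i + 1
--         return age_groups[i]
-- ===== SOURCE B (Python) =====
-- def _determine_age_group(age, age_groups):
--     """Determine to which age group the agent belongs"""
--     result = age_groups[0]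
--     for g in age_groups:
--         if age >= g:
--             result = g
--     return result
-- ===== Notes on version B (the rewrite author's own statement) =====
-- stated objective: simpler
-- what changed: Replaces A's three-way branch with an index-stepping interval-search while loop by a single forward reduction 'last boundary <= age, defaulting to the first boundary' over the list.
-- outside the precondition, e.g. on _determine_age_group(4, [0, 5, 3, 10]): A returns 0, B returns 3
import Mathlib
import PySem

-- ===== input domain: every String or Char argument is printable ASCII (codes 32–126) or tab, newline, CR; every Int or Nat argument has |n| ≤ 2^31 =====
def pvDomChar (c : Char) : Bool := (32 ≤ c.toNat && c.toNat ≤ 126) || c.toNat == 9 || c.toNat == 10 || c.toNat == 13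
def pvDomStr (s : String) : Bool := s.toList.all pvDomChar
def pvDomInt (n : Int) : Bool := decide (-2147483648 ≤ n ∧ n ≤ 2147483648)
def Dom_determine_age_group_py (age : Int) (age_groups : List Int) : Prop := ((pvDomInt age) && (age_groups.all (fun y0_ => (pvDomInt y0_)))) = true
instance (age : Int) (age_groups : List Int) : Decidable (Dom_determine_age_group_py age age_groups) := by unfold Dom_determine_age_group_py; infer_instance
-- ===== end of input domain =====

-- B replaces A's branchy interval-finding while loop with a single forward reduction
-- 'last boundary <= age, defaulting to the first boundary' (simpler; same cost).


-- ===== PORT A =====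
-- the while loop: state is the index i; fuel bounds the iteration count (under
-- Pre_ the loop always exits before the fuel runs out; fuel 0 is Python's IndexError region)
def determine_age_group_loop (age : Int) (age_groups : List Int) (i : Nat) : Nat → Int
  | 0 => 0
  | fuel + 1 =>
    let gi := PySem.List.pyGetD age_groups (i : Int) 0
    let gi1 := PySem.List.pyGetD age_groups ((i : Int) + 1) 0
    if age < gi ∨ age ≥ gi1 then determine_age_group_loop age age_groups (i + 1) fuel
    else gi

def determine_age_group_py (age : Int) (age_groups : List Int) : Int :=
  let last := PySem.List.pyGetD age_groups (-1) 0
  let first := PySem.List.pyGetD age_groups 0 0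
  if age ≥ last then last
  else if age < first then first
  else determine_age_group_loop age age_groups 0 age_groups.length

-- ===== PORT B =====
def determine_age_group_py_alt (age : Int) (age_groups : List Int) : Int :=
  let result := PySem.List.pyGetD age_groups 0 0
  age_groups.foldl (fun r g => if age ≥ g then g else r) result

-- ===== PRECONDITION & SPEC =====
-- Pre_ excludes the empty list, on which A raises IndexError, and unsorted boundary
-- lists (outside the natural domain of sorted age-group boundaries) on which the age
-- falls strictly between out-of-order boundaries, where A's first-matching-interval
-- scan returns accidental values or raises; unsorted lists on which the age clamps
-- below all boundaries or at/above the final boundary stay inside (A and B agree there).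
def Pre_determine_age_group_py (age : Int) (age_groups : List Int) : Prop :=
  age_groups ≠ [] ∧
    (List.Pairwise (· ≤ ·) age_groups ∨
      age_groups.getD (age_groups.length - 1) 0 ≤ age ∨
      ∀ g ∈ age_groups, age < g)
instance (age : Int) (age_groups : List Int) : Decidable (Pre_determine_age_group_py age age_groups) := by unfold Pre_determine_age_group_py; infer_instance
def pvWitness_determine_age_group_py : Int × List Int := (7, [0, 5, 10, 18, 65])

def Spec_determine_age_group_py (age : Int) (age_groups : List Int) (out : Int) : Prop := out = determine_age_group_py_alt age age_groups
instance (age : Int) (age_groups : List Int) (out : Int) : Decidable (Spec_determine_age_group_py age age_groups out) := by unfold Spec_determine_age_group_py; infer_instance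

-- ===== CLAIM (what is proved, stated in full; the proofs are below) =====
def Claim_equal_determine_age_group_py : Prop := ∀ (age : Int) (age_groups : List Int), Dom_determine_age_group_py age age_groups → Pre_determine_age_group_py age age_groups → Spec_determine_age_group_py age age_groups (determine_age_group_py age age_groups)


-- ===== LEMMAS AND PROOFS =====

-- B's fold computes the last element ≤ age, defaulting to the start value (no sortedness needed)
theorem foldB_char (age : Int) (gs : List Int) (r : Int) :
    gs.foldl (fun r g => if age ≥ g then g else r) r
      = ((gs.filter (fun g => decide (g ≤ age))).getLast?).getD r := by
  induction gs generalizing r with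
  | nil => simp
  | cons g t ih =>
    simp only [List.foldl_cons, List.filter_cons, ge_iff_le]
    by_cases h : g ≤ age
    · rw [if_pos h, decide_eq_true h, if_pos rfl, ih g, List.getLast?_cons]
      cases (t.filter (fun g => decide (g ≤ age))).getLast? <;> simp
    · rw [if_neg h, decide_eq_false h]
      simpa using ih r

-- if gs[j] ≤ age < gs[j+1] in a sorted list, the last element ≤ age is gs[j]
theorem filter_last_char (age : Int) (gs : List Int)
    (hs : List.Pairwise (· ≤ ·) gs) (j : Nat) (hj : j + 1 < gs.length)
    (h1 : gs.getD j 0 ≤ age) (h2 : age < gs.getD (j + 1) 0) :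
    (gs.filter (fun g => decide (g ≤ age))).getLast? = some (gs.getD j 0) := by
  have hjl : j < gs.length := by omega
  conv_lhs => rw [(List.take_append_drop (j + 1) gs).symm]
  rw [List.filter_append]
  have hdrop : (gs.drop (j + 1)).filter (fun g => decide (g ≤ age)) = [] := by
    rw [List.filter_eq_nil_iff]
    intro a ha
    obtain ⟨k, hk, rfl⟩ := List.getElem_of_mem ha
    have hk' : j + 1 + k < gs.length := by
      have := hk
      simp only [List.length_drop] at this
      omega
    simp only [List.getElem_drop]
    have hle : gs[j + 1]'hj ≤ gs[j + 1 + k]'hk' := by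
      rcases Nat.eq_or_lt_of_le (Nat.le_add_right (j+1) k) with h | h
      · exact le_of_eq (by congr 1)
      · exact (List.pairwise_iff_getElem.mp hs) _ _ _ _ h
    rw [List.getD_eq_getElem _ _ hj] at h2
    simp only [decide_eq_true_eq]
    omega
  rw [hdrop, List.append_nil]
  have htake : gs.take (j + 1) = gs.take j ++ [gs[j]] := by
    rw [List.take_add_one, List.getElem?_eq_getElem hjl]
    rfl
  rw [htake, List.filter_append]
  rw [List.getD_eq_getElem _ _ hjl] at h1 ⊢
  simp [List.getLast?_append, h1]

-- A's loop, started at index i with gs[i] ≤ age, returns gs[j] for the first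
-- j ≥ i with age < gs[j+1]; such j exists below length-1 because age < last
theorem loopA_char (age : Int) (gs : List Int) :
    ∀ fuel i, i + 1 < gs.length → gs.getD i 0 ≤ age →
      age < gs.getD (gs.length - 1) 0 →
      gs.length ≤ fuel + i + 1 →
      ∃ j, j + 1 < gs.length ∧ gs.getD j 0 ≤ age ∧ age < gs.getD (j + 1) 0 ∧
        determine_age_group_loop age gs i fuel = gs.getD j 0 := by
  intro fuel
  induction fuel with
  | zero => intro i h1 _ _ h4; omega
  | succ f ih =>
    intro i h1 h2 h3 h4
    have hgi : PySem.List.pyGetD gs (i : Int) 0 = gs.getD i 0 :=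
      PySem.List.pyGetD_natCast ..
    have hgi1 : PySem.List.pyGetD gs ((i : Int) + 1) 0 = gs.getD (i + 1) 0 := by
      rw [show ((i : Int) + 1) = ((i + 1 : Nat) : Int) by push_cast; ring]
      exact PySem.List.pyGetD_natCast ..
    rw [determine_age_group_loop]
    simp only [hgi, hgi1]
    by_cases hcond : age < gs.getD i 0 ∨ age ≥ gs.getD (i + 1) 0
    · rw [if_pos hcond]
      have hge : age ≥ gs.getD (i + 1) 0 := by
        rcases hcond with h | h
        · omega
        · exact h
      have hi2 : i + 2 < gs.length := by
        by_contra hc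
        have : i + 1 = gs.length - 1 := by omega
        rw [this] at hge
        omega
      exact ih (i + 1) hi2 hge h3 (by omega)
    · rw [if_neg hcond]
      push_neg at hcond
      exact ⟨i, h1, h2, hcond.2, rfl⟩

-- if the final element of the list is ≤ age, the filter keeps it as its last element
theorem filter_getLast_concat (age : Int) (l : List Int) (x : Int) (hx : x ≤ age) :
    ((l ++ [x]).filter (fun g => decide (g ≤ age))).getLast? = some x := by
  rw [List.filter_append]
  simp [List.getLast?_append, hx]

-- ===== VERDICT (by name: the statement is the Claim_ definition above) =====
theorem determine_age_group_py_spec : Claim_equal_determine_age_group_py := by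
  intro age gs _ hpre
  obtain ⟨hne, hdisj⟩ := hpre
  unfold Spec_determine_age_group_py determine_age_group_py determine_age_group_py_alt
  simp only
  have hlen : 0 < gs.length := List.length_pos_iff.mpr hne
  have hlastg : gs.getLast hne = gs.getD (gs.length - 1) 0 :=
    (List.getLast_eq_getElem hne).trans (List.getD_eq_getElem _ _ (by omega)).symm
  have hlast : PySem.List.pyGetD gs (-1) 0 = gs.getD (gs.length - 1) 0 :=
    (PySem.List.pyGetD_neg_one gs 0 hne).trans hlastg
  have hfirst : PySem.List.pyGetD gs 0 0 = gs.getD 0 0 := by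
    rw [show (0 : Int) = ((0 : Nat) : Int) from rfl]
    exact PySem.List.pyGetD_natCast ..
  rw [hlast, hfirst, foldB_char]
  by_cases h1 : age ≥ gs.getD (gs.length - 1) 0
  · rw [if_pos h1]
    -- the final element is ≤ age, so it is the filter's last element (no sortedness needed)
    have hfl : (gs.filter (fun g => decide (g ≤ age))).getLast?
        = some (gs.getD (gs.length - 1) 0) := by
      conv_lhs => rw [← List.dropLast_concat_getLast hne]
      rw [filter_getLast_concat age _ _ (hlastg ▸ h1), hlastg]
    rw [hfl]
    simp
  · rw [if_neg h1]
    by_cases h2 : age < gs.getD 0 0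
    · rw [if_pos h2]
      -- every boundary is > age, so the filter is empty (no sortedness needed)
      have hall : ∀ g ∈ gs, age < g := by
        rcases hdisj with hs | hge | hall
        · intro g hg
          obtain ⟨k, hk, rfl⟩ := List.getElem_of_mem hg
          have : gs.getD 0 0 ≤ gs.getD k 0 := by
            rw [List.getD_eq_getElem _ _ hlen, List.getD_eq_getElem _ _ hk]
            rcases Nat.eq_zero_or_pos k with h | h
            · exact le_of_eq (by congr 1; omega)
            · exact (List.pairwise_iff_getElem.mp hs) _ _ _ _ h
          rw [List.getD_eq_getElem _ _ hk] at this
          omega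
        · omega
        · exact hall
      have : gs.filter (fun g => decide (g ≤ age)) = [] := by
        rw [List.filter_eq_nil_iff]
        intro a ha
        have := hall a ha
        simp only [decide_eq_true_eq]
        omega
      simp [this]
    · rw [if_neg h2]
      -- middle case: the disjunction forces sortedness
      have hs : List.Pairwise (· ≤ ·) gs := by
        rcases hdisj with hs | hge | hall
        · exact hs
        · omega
        · exfalso
          have : age < gs.getD 0 0 := by
            rw [List.getD_eq_getElem _ _ hlen]
            exact hall _ (List.getElem_mem hlen)
          omega
      push_neg at h1 h2
      have hlen2 : 1 < gs.length := by
        by_contra hc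
        have h10 : gs.getD (gs.length - 1) 0 ≤ gs.getD 0 0 := by
          rw [List.getD_eq_getElem _ _ (by omega), List.getD_eq_getElem _ _ hlen]
          exact le_of_eq (by congr 1; omega)
        omega
      obtain ⟨j, hj1, hj2, hj3, hj4⟩ :=
        loopA_char age gs gs.length 0 (by omega) h2 h1 (by omega)
      rw [hj4, filter_last_char age gs hs j hj1 hj2 hj3]
      simp
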